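-- pv_equiv track=rewrite | github.com/ubccr/genesysv | mendelian/utils.py | is_denovo
-- ===== SOURCE A (Python) =====
-- def is_denovo(sample_array, father_id, mother_id, child_id):
--     looking_for_ids = (father_id, mother_id, child_id)
--     mother_gt = father_gt = child_gt = 'N/A'
--     for ele in sample_array:
--
--         sample_id = ele.get('Sample_ID')
--
--         if sample_id not in looking_for_ids:
--             continue
--
--         if sample_id == father_id:
--             return None
--         elif sample_id == mother_id:
--             return None
--         elif sample_id == child_id:
--             child_gt = ele.get('GT')
--             if child_gt not in ['0/1', '0|1', '0|1']:
--                 None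
--
--     if child_gt == 'N/A':
--         return None
--     return (father_gt, mother_gt, child_gt)
-- ===== SOURCE B (Python) =====
-- def is_denovo(sample_array, father_id, mother_id, child_id):
--     samples = list(sample_array)
--     if any(ele.get('Sample_ID') in (father_id, mother_id) for ele in samples):
--         return None
--     for ele in reversed(samples):
--         if ele.get('Sample_ID') == child_id:
--             gt = ele.get('GT', 'N/A')
--             if gt == 'N/A':
--                 return None
--             return ('N/A', 'N/A', gt)
--     return None
-- ===== Notes on version B (the rewrite author's own statement) =====
-- stated objective: idiomatic
-- what changed: B replaces A's forward scan carrying a mutable child_gt accumulator with two staged passes and no accumulator: an any() pass rejecting if any record carries a parental Sample_ID, then a back-to-front scan of reversed(samples) that returns at the FIRST child record it meets (A's last-child-wins, by traversal order instead of overwriting); Pre_ excludes the inputs where A returns a tuple containing Python None (no parental record and the last child record lacks a 'GT' key), not a value of the declared string-triple type -- B returns None there.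
-- outside the precondition, e.g. on is_denovo([{'Sample_ID': 'c'}], 'f', 'm', 'c'): A returns ('N/A', 'N/A', None), B returns None
import Mathlib
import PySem

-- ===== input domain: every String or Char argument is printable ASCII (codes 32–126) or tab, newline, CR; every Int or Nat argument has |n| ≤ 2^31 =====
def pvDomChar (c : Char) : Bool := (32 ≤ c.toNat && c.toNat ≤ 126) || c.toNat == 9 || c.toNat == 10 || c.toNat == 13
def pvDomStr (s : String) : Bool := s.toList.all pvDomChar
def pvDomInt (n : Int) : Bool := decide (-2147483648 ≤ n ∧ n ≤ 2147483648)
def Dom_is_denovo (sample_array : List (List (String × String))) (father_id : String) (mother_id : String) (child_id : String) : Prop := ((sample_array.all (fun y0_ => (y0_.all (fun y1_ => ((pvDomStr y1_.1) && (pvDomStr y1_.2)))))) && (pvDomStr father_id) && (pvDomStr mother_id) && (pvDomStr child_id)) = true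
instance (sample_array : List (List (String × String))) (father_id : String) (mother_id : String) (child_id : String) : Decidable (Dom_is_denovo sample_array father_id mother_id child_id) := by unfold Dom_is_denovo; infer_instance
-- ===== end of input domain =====

-- B drops A's forward scan with its mutable child_gt accumulator in favour of two staged
-- passes: an any() test for parental records, then a back-to-front scan that returns at
-- the first child record it meets (objective: idiomatic).

-- ===== PORT A =====
-- shared helpers: ele.get('Sample_ID') / ele.get('GT') / ele.get('GT', 'N/A') on a dict element
def pvSid (e : List (String × String)) : Option String := PySem.Dict.get? (PySem.Dict.mk e) "Sample_ID"
def pvGT (e : List (String × String)) : Option String := PySem.Dict.get? (PySem.Dict.mk e) "GT"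
def pvGTD (e : List (String × String)) : String := PySem.Dict.getD (PySem.Dict.mk e) "GT" "N/A"

-- the for-loop of A; child_gt : Option String models Python's child_gt (none = Python None)
def is_denovo_go (father_id mother_id child_id : String)
    (l : List (List (String × String))) (child_gt : Option String) :
    Option (String × String × String) :=
  match l with
  | [] =>
      if child_gt = some "N/A" then none
      else match child_gt with
           | some g => some ("N/A", "N/A", g)
           -- Python returns ('N/A', 'N/A', None) here — not a value of the declared
           -- string-triple type; Pre_ excludes these inputs.  We mark it with str(None).
           | none => some ("N/A", "N/A", "None")
  | ele :: rest =>
      let sample_id := pvSid ele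
      if sample_id ≠ some father_id ∧ sample_id ≠ some mother_id ∧ sample_id ≠ some child_id then
        is_denovo_go father_id mother_id child_id rest child_gt
      else if sample_id = some father_id then none
      else if sample_id = some mother_id then none
      else if sample_id = some child_id then
        is_denovo_go father_id mother_id child_id rest (pvGT ele)
      else  -- unreachable: sample_id is in the tuple but equals none of the three ids
        is_denovo_go father_id mother_id child_id rest child_gt

def is_denovo (sample_array : List (List (String × String))) (father_id : String) (mother_id : String) (child_id : String) : Option (String × String × String) :=
  is_denovo_go father_id mother_id child_id sample_array (some "N/A")

-- ===== PORT B =====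
-- the 'for ele in reversed(samples)' loop of B: first child record wins, nothing accumulated
def pvFindChild (child_id : String) : List (List (String × String)) → Option (String × String × String)
  | [] => none
  | e :: rest =>
      if pvSid e = some child_id then
        let gt := pvGTD e
        if gt = "N/A" then none else some ("N/A", "N/A", gt)
      else pvFindChild child_id rest

def is_denovo_alt (sample_array : List (List (String × String))) (father_id : String) (mother_id : String) (child_id : String) : Option (String × String × String) :=
  if sample_array.any (fun e => pvSid e == some father_id || pvSid e == some mother_id) then none
  else pvFindChild child_id sample_array.reverse

-- ===== PRECONDITION & SPEC =====
-- last element of sample_array whose 'Sample_ID' is child_id, if any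
def pvLastChild (sample_array : List (List (String × String))) (child_id : String) :
    Option (List (String × String)) :=
  (sample_array.filter (fun e => pvSid e == some child_id)).getLast?

-- Pre_ excludes exactly the inputs on which A returns ('N/A', 'N/A', None) — a tuple
-- containing Python None, not a value of the declared string-triple type: those where no
-- element carries the father's or mother's Sample_ID and the last element carrying the
-- child's Sample_ID has no 'GT' key.  B returns None there.
def Pre_is_denovo (sample_array : List (List (String × String))) (father_id : String) (mother_id : String) (child_id : String) : Prop :=
  ¬ ( sample_array.all (fun e => !(pvSid e == some father_id) && !(pvSid e == some mother_id)) = true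
      ∧ ((pvLastChild sample_array child_id).map (fun e => (pvGT e).isNone)).getD false = true )
instance (sample_array : List (List (String × String))) (father_id : String) (mother_id : String) (child_id : String) : Decidable (Pre_is_denovo sample_array father_id mother_id child_id) := by unfold Pre_is_denovo; infer_instance

def pvWitness_is_denovo : (List (List (String × String))) × String × String × String :=
  ([[("Sample_ID", "c"), ("GT", "0/1")]], "f", "m", "c")

def Spec_is_denovo (sample_array : List (List (String × String))) (father_id : String) (mother_id : String) (child_id : String) (out : Option (String × String × String)) : Prop := out = is_denovo_alt sample_array father_id mother_id child_id
instance (sample_array : List (List (String × String))) (father_id : String) (mother_id : String) (child_id : String) (out : Option (String × String × String)) : Decidable (Spec_is_denovo sample_array father_id mother_id child_id out) := by unfold Spec_is_denovo; infer_instance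

-- ===== CLAIM (what is proved, stated in full; the proofs are below) =====
def Claim_equal_is_denovo : Prop := ∀ (sample_array : List (List (String × String))) (father_id : String) (mother_id : String) (child_id : String), Dom_is_denovo sample_array father_id mother_id child_id → Pre_is_denovo sample_array father_id mother_id child_id → Spec_is_denovo sample_array father_id mother_id child_id (is_denovo sample_array father_id mother_id child_id)

-- ===== LEMMAS AND PROOFS =====

-- A's loop returns None as soon as some element carries a parental Sample_ID
theorem is_denovo_go_par (father_id mother_id child_id : String)
    (l : List (List (String × String))) (cg : Option String)
    (h : l.all (fun e => !(pvSid e == some father_id) && !(pvSid e == some mother_id)) = false) :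
    is_denovo_go father_id mother_id child_id l cg = none := by
  induction l generalizing cg with
  | nil => simp at h
  | cons e rest ih =>
    rw [List.all_cons, Bool.and_eq_false_iff] at h
    by_cases hf : pvSid e = some father_id
    · simp [is_denovo_go, hf]
    · by_cases hm : pvSid e = some mother_id
      · simp [is_denovo_go, hm]
      · have hrest : rest.all (fun e => !(pvSid e == some father_id) && !(pvSid e == some mother_id)) = false := by
          rcases h with h | h
          · simp [hf, hm] at h
          · exact h
        by_cases hc : pvSid e = some child_id
        · simp [is_denovo_go, hc, ih _ hrest]
        · simp [is_denovo_go, hf, hm, hc, ih _ hrest]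

-- the terminal computation of A's loop
def pvFinish (cg : Option String) : Option (String × String × String) :=
  if cg = some "N/A" then none
  else match cg with
       | some g => some ("N/A", "N/A", g)
       | none => some ("N/A", "N/A", "None")

-- with no parental element, A's loop computes pvFinish of the last child GT (or the accumulator)
theorem is_denovo_go_nopar (father_id mother_id child_id : String)
    (l : List (List (String × String))) (cg : Option String)
    (h : l.all (fun e => !(pvSid e == some father_id) && !(pvSid e == some mother_id)) = true) :
    is_denovo_go father_id mother_id child_id l cg =
      pvFinish (((pvLastChild l child_id).map pvGT).getD cg) := by
  induction l generalizing cg with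
  | nil => simp [is_denovo_go, pvLastChild, pvFinish]
  | cons e rest ih =>
    rw [List.all_cons, Bool.and_eq_true] at h
    obtain ⟨he, hrest'⟩ := h
    rw [Bool.and_eq_true, Bool.not_eq_true', Bool.not_eq_true', beq_eq_false_iff_ne, beq_eq_false_iff_ne] at he
    obtain ⟨hf, hm⟩ := he
    by_cases hc : pvSid e = some child_id
    · have hcf : child_id ≠ father_id := by rw [hc] at hf; simpa using hf
      have hcm : child_id ≠ mother_id := by rw [hc] at hm; simpa using hm
      have : is_denovo_go father_id mother_id child_id (e :: rest) cg =
          is_denovo_go father_id mother_id child_id rest (pvGT e) := by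
        simp [is_denovo_go, hc, hcf, hcm]
      rw [this, ih _ hrest']
      unfold pvLastChild
      rw [List.filter_cons_of_pos (by simpa using hc)]
      cases hlast : (rest.filter (fun e => pvSid e == some child_id)).getLast? with
      | none =>
        have : rest.filter (fun e => pvSid e == some child_id) = [] :=
          List.getLast?_eq_none_iff.mp hlast
        simp [this]
      | some e' =>
        have h1 : (e :: rest.filter (fun e => pvSid e == some child_id)).getLast? = some e' := by
          cases hfil : rest.filter (fun e => pvSid e == some child_id) with
          | nil => simp [hfil] at hlast
          | cons a t => rw [hfil] at hlast; rw [List.getLast?_cons_cons, hlast]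
        simp [h1]
    · have : is_denovo_go father_id mother_id child_id (e :: rest) cg =
          is_denovo_go father_id mother_id child_id rest cg := by
        simp [is_denovo_go, hf, hm, hc]
      rw [this, ih _ hrest']
      unfold pvLastChild
      rw [List.filter_cons_of_neg (by simpa using hc)]

-- B's reversed scan returns what the FIRST matching element of its argument dictates
theorem pvFindChild_eq_find? (child_id : String) (l : List (List (String × String))) :
    pvFindChild child_id l =
      match l.find? (fun e => pvSid e == some child_id) with
      | some e => if pvGTD e = "N/A" then none else some ("N/A", "N/A", pvGTD e)
      | none => none := by
  induction l with
  | nil => simp [pvFindChild]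
  | cons e rest ih =>
    by_cases hc : pvSid e = some child_id
    · simp [pvFindChild, hc, List.find?_cons_of_pos]
    · rw [List.find?_cons_of_neg (by simpa using hc)]
      simpa [pvFindChild, hc] using ih

-- the first match of the reversed list is the last match of the list
theorem find?_reverse_eq_getLast?_filter {α : Type} (p : α → Bool) (l : List α) :
    l.reverse.find? p = (l.filter p).getLast? := by
  rw [← List.head?_filter, List.filter_reverse, List.head?_reverse]

-- ===== VERDICT (by name: the statement is the Claim_ definition above) =====
theorem is_denovo_spec : Claim_equal_is_denovo := by
  intro sample_array father_id mother_id child_id _hdom hpre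
  unfold Spec_is_denovo is_denovo is_denovo_alt
  rw [pvFindChild_eq_find?, find?_reverse_eq_getLast?_filter]
  by_cases hp : sample_array.all
      (fun e => !(pvSid e == some father_id) && !(pvSid e == some mother_id)) = true
  · -- no element carries a parental Sample_ID: B's any() pass is False
    have hany : sample_array.any
        (fun e => pvSid e == some father_id || pvSid e == some mother_id) = false := by
      rw [List.any_eq_false]
      intro e he
      have := List.all_eq_true.mp hp e he
      simp only [Bool.and_eq_true, Bool.not_eq_true', beq_eq_false_iff_ne] at this
      simp [this.1, this.2]
    rw [is_denovo_go_nopar father_id mother_id child_id sample_array (some "N/A") hp]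
    simp only [hany, Bool.false_eq_true, if_false]
    cases hlast : pvLastChild sample_array child_id with
    | none =>
      unfold pvLastChild at hlast
      rw [hlast]
      simp [pvFinish]
    | some e =>
      unfold pvLastChild at hlast
      rw [hlast]
      cases hg : pvGT e with
      | none =>
        exact absurd ⟨hp, by unfold pvLastChild; rw [hlast]; simp [hg]⟩ hpre
      | some g =>
        have hgd : pvGTD e = g := by
          unfold pvGTD
          unfold pvGT at hg
          rw [PySem.Dict.getD_eq_get?_getD, hg]
          rfl
        by_cases hna : g = "N/A"
        · simp [pvFinish, hna, hg, hgd]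
        · simp [pvFinish, hna, hg, hgd]
  · -- some element carries a parental Sample_ID: B's any() pass is True
    have hp' := Bool.eq_false_iff.mpr hp
    rw [is_denovo_go_par father_id mother_id child_id sample_array (some "N/A") hp']
    have hany : sample_array.any
        (fun e => pvSid e == some father_id || pvSid e == some mother_id) = true := by
      obtain ⟨e, he, hpar⟩ := by simpa only [List.all_eq_false] using hp'
      simp only [Bool.not_eq_true, Bool.and_eq_false_iff, Bool.not_eq_false', beq_iff_eq] at hpar
      rw [List.any_eq_true]
      refine ⟨e, he, ?_⟩
      rcases hpar with hf | hm
      · simp [hf]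
      · simp [hm]
    simp [hany]
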